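-- pv_equiv track=rewrite | github.com/iskandr/parakeet | benchmarks/gf2powmod.py | gf2powmod
-- ===== SOURCE A (Python) =====
-- def gf2mulmod(x,y,m):
--     z = 0
--     while x > 0:
--         if (x & 1) != 0:
--             z ^= y
--         y <<= 1
--         y2 = y ^ m
--         if y2 < y:
--             y = y2
--         x >>= 1
--     return z
--
-- def gf2powmod(x,k,m):
--     z = 1
--     while k > 0:
--         if (k & 1) != 0:
--             z = gf2mulmod(z,x,m)
--         x = gf2mulmod(x,x,m)
--         k >>= 1
--     return z
-- ===== SOURCE B (Python) =====
-- def gf2mulmod(x,y,m):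
--     z = 0
--     while x > 0:
--         if (x & 1) != 0:
--             z ^= y
--         y <<= 1
--         y2 = y ^ m
--         if y2 < y:
--             y = y2
--         x >>= 1
--     return z
--
-- def gf2powmod(x,k,m):
--     # two-pass decomposition: first tabulate the repeated squares of x
--     # (one per bit of k), then combine the ones at set bits of k.
--     sq = []
--     n = k
--     while n > 0:
--         sq.append(x)
--         x = gf2mulmod(x, x, m)
--         n >>= 1
--     z = 1
--     for s in sq:
--         if k & 1:
--             z = gf2mulmod(z, s, m)
--         k >>= 1
--     return z
-- ===== Notes on version B (the rewrite author's own statement) =====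
-- stated objective: alternative
-- what changed: Replaced A's single interleaved square-and-multiply loop (which squares x and consumes a bit of k in the same iteration) by a two-pass decomposition: first build the table of repeated squares of x (one per bit of k), then a second pass folds over that table multiplying in the entries at set bits of k.
import Mathlib
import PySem

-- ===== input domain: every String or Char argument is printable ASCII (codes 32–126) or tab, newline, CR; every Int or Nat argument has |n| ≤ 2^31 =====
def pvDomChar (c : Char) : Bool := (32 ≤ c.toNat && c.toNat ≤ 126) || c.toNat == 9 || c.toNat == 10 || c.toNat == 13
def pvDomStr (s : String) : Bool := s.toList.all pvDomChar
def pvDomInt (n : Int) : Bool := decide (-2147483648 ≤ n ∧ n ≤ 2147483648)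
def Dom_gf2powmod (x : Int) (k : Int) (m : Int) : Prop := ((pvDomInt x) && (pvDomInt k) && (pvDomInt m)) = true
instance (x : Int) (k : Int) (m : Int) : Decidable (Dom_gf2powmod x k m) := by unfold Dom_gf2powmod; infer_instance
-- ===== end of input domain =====

-- B replaces A's interleaved square-and-multiply loop by a two-pass decomposition
-- (tabulate the repeated squares, then combine those at set bits of k); objective:
-- alternative structure, same cost; equal return value on all inputs.

theorem pv_shiftRight_one_toNat_lt (x : Int) (h : 0 < x) : (x >>> (1 : Nat)).toNat < x.toNat := by
  have h2 : x >>> (1 : Nat) = x / 2 := by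
    rw [Int.shiftRight_eq_div_pow]; norm_num
  omega

-- ===== PORT A =====
-- while-loop of gf2mulmod, state (x, y, z)
def gf2mulmodGo (x y z m : Int) : Int :=
  if h : 0 < x then
    let z' := if PySem.Int.band x 1 ≠ 0 then PySem.Int.bxor z y else z
    let y1 := y <<< (1 : Nat)
    let y2 := PySem.Int.bxor y1 m
    let y' := if y2 < y1 then y2 else y1
    gf2mulmodGo (x >>> (1 : Nat)) y' z' m
  else z
termination_by x.toNat
decreasing_by exact pv_shiftRight_one_toNat_lt x h

def gf2mulmod (x y m : Int) : Int := gf2mulmodGo x y 0 m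

-- while-loop of gf2powmod, state (z, x, k)
def gf2powmodGo (z x k m : Int) : Int :=
  if h : 0 < k then
    let z' := if PySem.Int.band k 1 ≠ 0 then gf2mulmod z x m else z
    gf2powmodGo z' (gf2mulmod x x m) (k >>> (1 : Nat)) m
  else z
termination_by k.toNat
decreasing_by exact pv_shiftRight_one_toNat_lt k h

def gf2powmod (x : Int) (k : Int) (m : Int) : Int := gf2powmodGo 1 x k m

-- ===== PORT B =====
-- first pass of Source B: the table sq of repeated squares of x, one entry per bit of n
def gf2powmodSq (x n m : Int) : List Int :=
  if h : 0 < n then x :: gf2powmodSq (gf2mulmod x x m) (n >>> (1 : Nat)) m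
  else []
termination_by n.toNat
decreasing_by exact pv_shiftRight_one_toNat_lt n h

-- second pass of Source B: for s in sq, mutating (z, k)
def gf2powmod_alt (x : Int) (k : Int) (m : Int) : Int :=
  ((gf2powmodSq x k m).foldl
    (fun (p : Int × Int) s =>
      (if PySem.Int.band p.2 1 ≠ 0 then gf2mulmod p.1 s m else p.1, p.2 >>> (1 : Nat)))
    (1, k)).1

-- ===== PRECONDITION & SPEC =====
def Spec_gf2powmod (x : Int) (k : Int) (m : Int) (out : Int) : Prop := out = gf2powmod_alt x k m
instance (x : Int) (k : Int) (m : Int) (out : Int) : Decidable (Spec_gf2powmod x k m out) := by unfold Spec_gf2powmod; infer_instance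

-- ===== CLAIM (what is proved, stated in full; the proofs are below) =====
def Claim_equal_gf2powmod : Prop := ∀ (x : Int) (k : Int) (m : Int), Dom_gf2powmod x k m → Spec_gf2powmod x k m (gf2powmod x k m)

-- ===== LEMMAS AND PROOFS =====
theorem pv_fold_eq_go (m : Int) : ∀ (fuel : Nat) (k : Int), k.toNat ≤ fuel → ∀ (z x : Int),
    ((gf2powmodSq x k m).foldl
      (fun (p : Int × Int) s =>
        (if PySem.Int.band p.2 1 ≠ 0 then gf2mulmod p.1 s m else p.1, p.2 >>> (1 : Nat)))
      (z, k)).1 = gf2powmodGo z x k m := by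
  intro fuel
  induction fuel with
  | zero =>
    intro k hk z x
    have hk0 : ¬ 0 < k := by omega
    rw [gf2powmodSq, gf2powmodGo]
    simp [hk0]
  | succ n ih =>
    intro k hk z x
    by_cases hpos : 0 < k
    · rw [gf2powmodSq, gf2powmodGo]
      simp only [hpos, dif_pos, List.foldl_cons]
      have hlt := pv_shiftRight_one_toNat_lt k hpos
      exact ih (k >>> (1 : Nat)) (by omega) _ (gf2mulmod x x m)
    · rw [gf2powmodSq, gf2powmodGo]
      simp [hpos]

-- ===== VERDICT (by name: the statement is the Claim_ definition above) =====
theorem gf2powmod_spec : Claim_equal_gf2powmod := by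
  intro x k m _
  unfold Spec_gf2powmod gf2powmod gf2powmod_alt
  exact (pv_fold_eq_go m k.toNat k (le_refl _) 1 x).symm
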